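-- pv_equiv track=rewrite | github.com/robang74/ragent | utils/basic_utils.py | split_list_by_key_value
-- ===== SOURCE A (Python) =====
-- def split_list_by_key_value(dict_list, key, value):
--     result = []
--     temp_list = []
--     count = 0
--
--     for d in dict_list:
--         # 检查字典是否有指定的key，并且该key的值是否等于指定的value
--         if d.get(key) == value:
--             count += 1
--             temp_list.append(d)
--             # 如果指定值的出现次数为2，则分割列表
--             if count == 2:
--                 result.append(temp_list)
--                 temp_list = []
--                 count = 0
--         else:
--             # 如果当前字典的key的值不是指定的value，则直接添加到当前轮次的列表
--             temp_list.append(d)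
--
--     # 将剩余的临时列表（如果有）添加到结果列表
--     if temp_list:
--         result.append(temp_list)
--
--     return result
-- ===== SOURCE B (Python) =====
-- def split_list_by_key_value(dict_list, key, value):
--     cuts = [i for i, d in enumerate(dict_list) if d.get(key) == value][1::2]
--     groups = []
--     start = 0
--     for c in cuts:
--         groups.append(dict_list[start:c + 1])
--         start = c + 1
--     if start < len(dict_list):
--         groups.append(dict_list[start:])
--     return groups
-- ===== Notes on version B (the rewrite author's own statement) =====
-- stated objective: alternative
-- what changed: B replaces A's single pass with a running temp-list/count accumulator by index arithmetic: one scan collects the positions where d.get(key) == value, every second such position becomes an inclusive cut point, and the result is the list of slices of dict_list between consecutive cut points plus the non-empty tail.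
import Mathlib
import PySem

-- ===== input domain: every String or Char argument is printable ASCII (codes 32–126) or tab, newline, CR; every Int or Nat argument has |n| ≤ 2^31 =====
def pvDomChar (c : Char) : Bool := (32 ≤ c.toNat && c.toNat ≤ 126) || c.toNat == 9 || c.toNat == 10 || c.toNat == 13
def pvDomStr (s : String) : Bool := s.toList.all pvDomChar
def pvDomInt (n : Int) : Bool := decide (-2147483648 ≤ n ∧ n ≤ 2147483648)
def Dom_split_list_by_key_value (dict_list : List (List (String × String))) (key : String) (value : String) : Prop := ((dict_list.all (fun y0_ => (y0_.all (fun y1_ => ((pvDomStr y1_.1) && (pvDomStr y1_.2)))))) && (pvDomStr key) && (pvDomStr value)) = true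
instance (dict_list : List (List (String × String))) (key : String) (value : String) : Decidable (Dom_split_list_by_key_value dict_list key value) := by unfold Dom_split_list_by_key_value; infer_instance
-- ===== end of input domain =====

-- B re-implements the grouping by index arithmetic: one scan collects the match positions,
-- every second one becomes an inclusive cut point, and the groups are slices between cuts
-- (same return value; no running count/temp accumulator). Objective: alternative decomposition.

-- ===== PORT A =====
def split_list_by_key_value (dict_list : List (List (String × String))) (key : String) (value : String) : List (List (List (String × String))) :=
  let st := dict_list.foldl (fun st d =>
      if (PySem.Dict.mk d).get? key == some value then
        -- count += 1; temp_list.append(d); if count == 2: flush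
        if st.2.2 + 1 == 2 then
          (st.1 ++ [st.2.1 ++ [d]], ([] : List (List (String × String))), (0 : Int))
        else (st.1, st.2.1 ++ [d], st.2.2 + 1)
      else (st.1, st.2.1 ++ [d], st.2.2))
    (([], [], 0))
  -- if temp_list: result.append(temp_list)
  if st.2.1.isEmpty then st.1 else st.1 ++ [st.2.1]

-- ===== PORT B =====
-- hand port of xs[1::2] (slice with start 1, step 2): exact for that slice on any list
def pvEverySecond {α : Type} : List α → List α
  | [] => []
  | [_] => []
  | _ :: b :: rest => b :: pvEverySecond rest

def split_list_by_key_value_alt (dict_list : List (List (String × String))) (key : String) (value : String) : List (List (List (String × String))) :=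
  -- cuts = [i for i, d in enumerate(dict_list) if d.get(key) == value][1::2]
  let hits := (PySem.List.enumerate dict_list 0).foldl
      (fun acc p => if (PySem.Dict.mk p.2).get? key == some value then acc ++ [p.1] else acc)
      ([] : List Int)
  let cuts := pvEverySecond hits
  -- for c in cuts: groups.append(dict_list[start:c+1]); start = c+1
  let st := cuts.foldl
      (fun (st : List (List (List (String × String))) × Int) c =>
        (st.1 ++ [PySem.List.slice dict_list (some st.2) (some (c + 1))], c + 1))
      (([], 0))
  -- if start < len(dict_list): groups.append(dict_list[start:])
  if st.2 < (dict_list.length : Int) then st.1 ++ [PySem.List.slice dict_list (some st.2) none] else st.1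

-- ===== PRECONDITION & SPEC =====
def Spec_split_list_by_key_value (dict_list : List (List (String × String))) (key : String) (value : String) (out : List (List (List (String × String)))) : Prop := out = split_list_by_key_value_alt dict_list key value
instance (dict_list : List (List (String × String))) (key : String) (value : String) (out : List (List (List (String × String)))) : Decidable (Spec_split_list_by_key_value dict_list key value out) := by unfold Spec_split_list_by_key_value; infer_instance

-- ===== CLAIM (what is proved, stated in full; the proofs are below) =====
def Claim_equal_split_list_by_key_value : Prop := ∀ (dict_list : List (List (String × String))) (key : String) (value : String), Dom_split_list_by_key_value dict_list key value → Spec_split_list_by_key_value dict_list key value (split_list_by_key_value dict_list key value)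

-- ===== LEMMAS AND PROOFS =====

-- xs[0::2] (companion of pvEverySecond, proof-side only)
def pvEveryFirst {α : Type} : List α → List α
  | [] => []
  | x :: xs => x :: pvEverySecond xs

-- prepend an element to the first group (creating it if there is none)
def pvConsHead {α : Type} (d : α) : List (List α) → List (List α)
  | [] => [[d]]
  | g :: gs => (d :: g) :: gs

-- reference recursion for A's loop: temp accumulator, Bool = "one match pending"
def pvGo {α : Type} (m : α → Bool) : List α → List α → Bool → List (List α)
  | [], temp, _ => if temp.isEmpty then [] else [temp]
  | d :: t, temp, c =>
    if m d then
      if c then (temp ++ [d]) :: pvGo m t [] false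
      else pvGo m t (temp ++ [d]) true
    else pvGo m t (temp ++ [d]) c

-- indices of the matching elements (Nat form)
def pvIdx {α : Type} (m : α → Bool) : List α → List Nat
  | [] => []
  | d :: t => if m d then 0 :: (pvIdx m t).map (· + 1) else (pvIdx m t).map (· + 1)

-- reference recursion for B's slicing loop (Nat cut points)
def pvBuild {α : Type} (dl : List α) : Nat → List Nat → List (List α)
  | start, [] => if start < dl.length then [dl.drop start] else []
  | start, c :: cs => (dl.drop start).take (c + 1 - start) :: pvBuild dl (c + 1) cs

theorem pvEverySecond_map {α β : Type} (f : α → β) (l : List α) :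
    pvEverySecond (l.map f) = (pvEverySecond l).map f := by
  match l with
  | [] => rfl
  | [_] => rfl
  | x :: y :: r => simp [pvEverySecond, pvEverySecond_map f r]

theorem pvEverySecond_cons {α : Type} (x : α) (xs : List α) :
    pvEverySecond (x :: xs) = pvEveryFirst xs := by
  cases xs <;> simp [pvEverySecond, pvEveryFirst]

theorem pvEveryFirst_map {α β : Type} (f : α → β) (l : List α) :
    pvEveryFirst (l.map f) = (pvEveryFirst l).map f := by
  cases l <;> simp [pvEveryFirst, pvEverySecond_map]

theorem pvFoldEnum {α : Type} (m : α → Bool) (l : List α) (s : Int) (acc : List Int) :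
    (PySem.List.enumerate l s).foldl (fun acc p => if m p.2 then acc ++ [p.1] else acc) acc
      = acc ++ (pvIdx m l).map (fun k : Nat => s + (k : Int)) := by
  induction l generalizing s acc with
  | nil => simp [pvIdx, PySem.List.enumerate]
  | cons d t ih =>
    rw [PySem.List.enumerate_cons]
    simp only [List.foldl_cons]
    have hmap : ((pvIdx m t).map (· + 1)).map (fun k : Nat => s + (k : Int))
        = (pvIdx m t).map (fun k : Nat => (s + 1) + (k : Int)) := by
      rw [List.map_map]
      refine List.map_congr_left fun k _ => ?_
      simp only [Function.comp_apply]
      push_cast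
      ring
    by_cases h : m d
    · simp only [h, ite_true, pvIdx, List.map_cons, hmap, ih (s + 1) (acc ++ [s])]
      simp
    · simp only [h, pvIdx, Bool.false_eq_true, ite_false, hmap, ih (s + 1) acc]

theorem pvBuild_shift {α : Type} (d : α) (t : List α) (start : Nat) (cuts : List Nat) :
    pvBuild (d :: t) (start + 1) (cuts.map (· + 1)) = pvBuild t start cuts := by
  induction cuts generalizing start with
  | nil => simp [pvBuild]
  | cons c cs ih => simp [pvBuild, ih, Nat.succ_sub_succ]

theorem pvBuildFold {α : Type} (dl : List α) (cuts : List Nat) (groups : List (List α)) (start : Nat) :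
    (let st := (cuts.map (fun k : Nat => (k : Int))).foldl
        (fun (st : List (List α) × Int) c => (st.1 ++ [PySem.List.slice dl (some st.2) (some (c + 1))], c + 1))
        (groups, (start : Int));
     if st.2 < (dl.length : Int) then st.1 ++ [PySem.List.slice dl (some st.2) none] else st.1)
      = groups ++ pvBuild dl start cuts := by
  induction cuts generalizing groups start with
  | nil =>
    by_cases h : start < dl.length <;>
      simp [pvBuild, h, PySem.List.slice_from_natCast]
  | cons c cs ih =>
    simp only [List.map_cons, List.foldl_cons]
    have h1 : (c : Int) + 1 = ((c + 1 : Nat) : Int) := by push_cast; ring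
    rw [h1, PySem.List.slice_natCast,
      ih (groups ++ [(dl.drop start).take (c + 1 - start)]) (c + 1)]
    simp [pvBuild]

theorem pvBuild_cons {α : Type} (d : α) (t : List α) (cuts : List Nat) :
    pvBuild (d :: t) 0 (cuts.map (· + 1)) = pvConsHead d (pvBuild t 0 cuts) := by
  cases cuts with
  | nil => cases t <;> simp [pvBuild, pvConsHead]
  | cons c cs => simp [pvBuild, pvConsHead, pvBuild_shift]

theorem pvGo_cons_temp {α : Type} (m : α → Bool) (l : List α) (c : Bool) (d : α) (temp : List α) :
    pvGo m l (d :: temp) c = pvConsHead d (pvGo m l temp c) := by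
  induction l generalizing temp c with
  | nil => cases temp <;> simp [pvGo, pvConsHead]
  | cons e t ih =>
    by_cases he : m e <;> cases c <;>
      simp [pvGo, he, pvConsHead, ih]

theorem pvMain {α : Type} (m : α → Bool) (l : List α) :
    pvBuild l 0 (pvEverySecond (pvIdx m l)) = pvGo m l [] false ∧
    pvBuild l 0 (pvEveryFirst (pvIdx m l)) = pvGo m l [] true := by
  induction l with
  | nil => constructor <;> simp [pvBuild, pvIdx, pvEverySecond, pvEveryFirst, pvGo]
  | cons d t ih =>
    by_cases h : m d
    · constructor
      · rw [show pvIdx m (d :: t) = 0 :: (pvIdx m t).map (· + 1) by simp [pvIdx, h]]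
        rw [pvEverySecond_cons, pvEveryFirst_map, pvBuild_cons, ih.2]
        simp [pvGo, h, pvGo_cons_temp, pvConsHead]
      · rw [show pvIdx m (d :: t) = 0 :: (pvIdx m t).map (· + 1) by simp [pvIdx, h]]
        show pvBuild (d :: t) 0 (0 :: pvEverySecond ((pvIdx m t).map (· + 1))) = _
        rw [pvEverySecond_map]
        simp [pvBuild, pvBuild_shift d t 0, ih.1, pvGo, h]
    · have hidx : pvIdx m (d :: t) = (pvIdx m t).map (· + 1) := by simp [pvIdx, h]
      constructor <;>
        rw [hidx] <;>
        [rw [pvEverySecond_map]; rw [pvEveryFirst_map]] <;>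
        rw [pvBuild_cons] <;>
        [rw [ih.1]; rw [ih.2]] <;>
        simp [pvGo, h, pvGo_cons_temp, pvConsHead]

theorem pvAfold {α : Type} (m : α → Bool) (l : List α) (res : List (List α)) (temp : List α) (c : Bool) :
    (let st := l.foldl (fun (st : List (List α) × List α × Int) d =>
        if m d then
          if st.2.2 + 1 == 2 then (st.1 ++ [st.2.1 ++ [d]], ([] : List α), (0 : Int))
          else (st.1, st.2.1 ++ [d], st.2.2 + 1)
        else (st.1, st.2.1 ++ [d], st.2.2))
      ((res, temp, if c then (1 : Int) else 0));
     if st.2.1.isEmpty then st.1 else st.1 ++ [st.2.1])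
      = res ++ pvGo m l temp c := by
  induction l generalizing res temp c with
  | nil => cases temp <;> simp [pvGo]
  | cons d t ih =>
    cases c with
    | false =>
      by_cases h : m d
      · have h2 : ((0 : Int) + 1 == 2) = false := by decide
        simpa only [List.foldl_cons, h, ite_true, h2, Bool.false_eq_true, ite_false, pvGo]
          using ih res (temp ++ [d]) true
      · simpa only [List.foldl_cons, h, Bool.false_eq_true, ite_false, pvGo]
          using ih res (temp ++ [d]) false
    | true =>
      by_cases h : m d
      · have h2 : ((1 : Int) + 1 == 2) = true := by decide
        have := ih (res ++ [temp ++ [d]]) [] false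
        simp only [List.foldl_cons, h, ite_true, h2, pvGo, List.append_assoc,
          List.singleton_append] at this ⊢
        exact this
      · simpa only [List.foldl_cons, h, Bool.false_eq_true, ite_false, pvGo]
          using ih res (temp ++ [d]) true

-- ===== VERDICT (by name: the statement is the Claim_ definition above) =====
theorem split_list_by_key_value_spec : Claim_equal_split_list_by_key_value := by
  intro dl key value _
  show split_list_by_key_value dl key value = split_list_by_key_value_alt dl key value
  have hA := pvAfold (fun d => (PySem.Dict.mk d).get? key == some value) dl [] [] false
  have hE := pvFoldEnum (fun d => (PySem.Dict.mk d).get? key == some value) dl 0 []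
  have hB := pvBuildFold dl (pvEverySecond (pvIdx (fun d => (PySem.Dict.mk d).get? key == some value) dl)) [] 0
  have hM := (pvMain (fun d => (PySem.Dict.mk d).get? key == some value) dl).1
  simp only [List.nil_append, zero_add, Nat.cast_zero, Bool.false_eq_true, ite_false] at hA hE hB
  simp only [split_list_by_key_value, split_list_by_key_value_alt]
  rw [hA, hE, pvEverySecond_map, hB, hM]
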